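-- pv_equiv track=rewrite | github.com/SailfinIO/sailfin | scripts/test_llvm_gen.py | _split_struct_fields
-- ===== SOURCE A (Python) =====
-- def _split_struct_fields(body: str) -> list[str]:
--     fields = []
--     depth = 0
--     current = ""
--     for ch in body:
--         if ch in "({":
--             depth += 1
--             current += ch
--         elif ch in ")}":
--             depth -= 1
--             current += ch
--         elif ch == "," and depth == 0:
--             fields.append(current)
--             current = ""
--         else:
--             current += ch
--     if current.strip():
--         fields.append(current)
--     return fields
-- ===== SOURCE B (Python) =====
-- def _cut(s):
--     depth = 0
--     for i, ch in enumerate(s):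
--         if ch in "({":
--             depth += 1
--         elif ch in ")}":
--             depth -= 1
--         elif ch == "," and depth == 0:
--             return s[:i], s[i + 1:]
--     return s, None
--
--
-- def _split_struct_fields(body: str) -> list[str]:
--     fields = []
--     rest = body
--     while True:
--         seg, rest = _cut(rest)
--         if rest is None:
--             if seg.strip():
--                 fields.append(seg)
--             return fields
--         fields.append(seg)
-- ===== Notes on version B (the rewrite author's own statement) =====
-- stated objective: alternative
-- what changed: A single pass threading a growing accumulator string through the whole loop is replaced by a cut-based decomposition: a helper finds the index of the next top-level comma and slices the string there, and the driver repeatedly cuts off one field at a time.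
import Mathlib
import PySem

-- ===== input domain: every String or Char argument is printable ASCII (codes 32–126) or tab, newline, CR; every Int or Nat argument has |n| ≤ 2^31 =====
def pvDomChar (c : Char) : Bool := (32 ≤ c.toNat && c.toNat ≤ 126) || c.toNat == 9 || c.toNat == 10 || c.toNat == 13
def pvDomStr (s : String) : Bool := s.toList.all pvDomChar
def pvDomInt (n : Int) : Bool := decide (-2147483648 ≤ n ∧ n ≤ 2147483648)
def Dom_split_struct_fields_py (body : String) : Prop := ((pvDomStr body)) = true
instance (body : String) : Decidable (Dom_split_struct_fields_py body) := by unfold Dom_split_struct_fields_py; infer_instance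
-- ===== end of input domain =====

-- B replaces A's one-pass accumulator loop by repeated "find next top-level comma, slice there" cuts (alternative decomposition, same cost).

-- ===== PORT A =====
-- one loop step of A: state = (fields, depth, current)
def pvAStep (st : List (List Char) × Int × List Char) (c : Char) : List (List Char) × Int × List Char :=
  if c = '(' ∨ c = '{' then (st.1, st.2.1 + 1, st.2.2 ++ [c])
  else if c = ')' ∨ c = '}' then (st.1, st.2.1 - 1, st.2.2 ++ [c])
  else if c = ',' ∧ st.2.1 = 0 then (st.1 ++ [st.2.2], st.2.1, [])
  else (st.1, st.2.1, st.2.2 ++ [c])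

-- A's trailing 'if current.strip(): fields.append(current)'
def pvAFin (st : List (List Char) × Int × List Char) : List (List Char) :=
  if PySem.Chars.strip st.2.2 ≠ [] then st.1 ++ [st.2.2] else st.1

def split_struct_fields_py (body : String) : List String :=
  ((body.toList.foldl pvAStep ([], 0, [])) |> pvAFin).map (fun cs => String.ofList cs)

-- ===== PORT B =====
-- B's _cut: scan with an index, slice at the first depth-0 comma (s[:i], s[i+1:])
def pvCutGo (full : List Char) (rem : List Char) (i : Nat) (d : Int) : List Char × Option (List Char) :=
  match rem with
  | [] => (full, none)
  | c :: rest =>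
    if c = '(' ∨ c = '{' then pvCutGo full rest (i + 1) (d + 1)
    else if c = ')' ∨ c = '}' then pvCutGo full rest (i + 1) (d - 1)
    else if c = ',' ∧ d = 0 then (full.take i, some (full.drop (i + 1)))
    else pvCutGo full rest (i + 1) d

def pvCut (s : List Char) : List Char × Option (List Char) := pvCutGo s s 0 0

-- termination fact for B's driver loop (the port cites it in decreasing_by)
theorem pvCutGo_some_length : ∀ (rem : List Char) (full : List Char) (i : Nat) (d : Int)
    (seg rest : List Char), rem = full.drop i → pvCutGo full rem i d = (seg, some rest) →
    rest.length < full.length := by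
  intro rem
  induction rem with
  | nil => intro full i d seg rest _ hcg; simp [pvCutGo] at hcg
  | cons c r ih =>
    intro full i d seg rest hdrop h
    have hr : r = full.drop (i + 1) := by
      have h0 := congrArg List.tail hdrop
      rw [List.tail_drop] at h0; simpa using h0
    have hi : i < full.length := by
      by_contra hle
      have hnil : full.drop i = [] := List.drop_eq_nil_of_le (by omega)
      rw [hnil] at hdrop; simp at hdrop
    simp only [pvCutGo] at h
    split_ifs at h with h1 h2 h3
    · exact ih full (i+1) (d+1) seg rest hr h
    · exact ih full (i+1) (d-1) seg rest hr h
    · obtain ⟨_, h2⟩ := Prod.mk.injEq .. ▸ (by exact h : (full.take i, some (full.drop (i+1))) = (seg, some rest))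
      have : rest = full.drop (i + 1) := by
        cases h; rfl
      subst this
      simp [List.length_drop]; omega
    · exact ih full (i+1) d seg rest hr h

theorem pvCut_some_length (s seg rest : List Char) (h : pvCut s = (seg, some rest)) :
    rest.length < s.length :=
  pvCutGo_some_length s s 0 0 seg rest (by simp) h

-- B's driver: repeatedly cut off one field
def pvBGo (s : List Char) : List (List Char) :=
  match h : pvCut s with
  | (seg, none) => if PySem.Chars.strip seg ≠ [] then [seg] else []
  | (seg, some rest) => seg :: pvBGo rest
termination_by s.length
decreasing_by exact pvCut_some_length s seg rest h

def split_struct_fields_py_alt (body : String) : List String :=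
  (pvBGo body.toList).map (fun cs => String.ofList cs)

-- ===== PRECONDITION & SPEC =====
def Spec_split_struct_fields_py (body : String) (out : List String) : Prop := out = split_struct_fields_py_alt body
instance (body : String) (out : List String) : Decidable (Spec_split_struct_fields_py body out) := by unfold Spec_split_struct_fields_py; infer_instance

-- ===== CLAIM (what is proved, stated in full; the proofs are below) =====
def Claim_equal_split_struct_fields_py : Prop := ∀ (body : String), Dom_split_struct_fields_py body → Spec_split_struct_fields_py body (split_struct_fields_py body)

-- ===== LEMMAS AND PROOFS =====

-- structural version of pvCut used to relate the two programs
def pvSCut : List Char → Int → List Char × Option (List Char)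
  | [], _ => ([], none)
  | c :: rest, d =>
    if c = '(' ∨ c = '{' then let p := pvSCut rest (d + 1); (c :: p.1, p.2)
    else if c = ')' ∨ c = '}' then let p := pvSCut rest (d - 1); (c :: p.1, p.2)
    else if c = ',' ∧ d = 0 then ([], some rest)
    else let p := pvSCut rest d; (c :: p.1, p.2)

theorem pvCutGo_eq_sCut : ∀ (rem full : List Char) (i : Nat) (d : Int), rem = full.drop i →
    pvCutGo full rem i d = (full.take i ++ (pvSCut rem d).1, (pvSCut rem d).2) := by
  intro rem
  induction rem with
  | nil =>
    intro full i d hdrop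
    have : full.length ≤ i := by
      by_contra hle
      have := List.drop_eq_nil_iff.mp hdrop.symm; omega
    simp [pvCutGo, pvSCut, List.take_of_length_le this]
  | cons c r ih =>
    intro full i d hdrop
    have hr : r = full.drop (i + 1) := by
      have h0 := congrArg List.tail hdrop
      rw [List.tail_drop] at h0; simpa using h0
    have hget : full[i]? = some c := by
      have : (full.drop i)[0]? = some c := by rw [← hdrop]; rfl
      simpa using this
    have htake : full.take (i + 1) = full.take i ++ [c] := by
      simp [List.take_add_one, hget]
    simp only [pvCutGo, pvSCut]
    split_ifs with h1 h2 h3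
    · rw [ih full (i+1) (d+1) hr, htake]; simp
    · rw [ih full (i+1) (d-1) hr, htake]; simp
    · simp [hr]
    · rw [ih full (i+1) d hr, htake]; simp

theorem pvCut_eq_sCut (s : List Char) : pvCut s = pvSCut s 0 := by
  rw [pvCut, pvCutGo_eq_sCut s s 0 0 (by simp)]; simp

-- A's fold, started anywhere, expressed through the structural cut
theorem pvFold_scut : ∀ (s : List Char) (d : Int) (cur : List Char) (fs : List (List Char)),
    pvAFin (List.foldl pvAStep (fs, d, cur) s) =
      match pvSCut s d with
      | (seg, none) => fs ++ (if PySem.Chars.strip (cur ++ seg) ≠ [] then [cur ++ seg] else [])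
      | (seg, some rest) => pvAFin (List.foldl pvAStep (fs ++ [cur ++ seg], 0, ([] : List Char)) rest) := by
  intro s
  induction s with
  | nil => intro d cur fs; simp only [List.foldl_nil, pvSCut, pvAFin]; split_ifs <;> simp_all
  | cons c r ih =>
    intro d cur fs
    simp only [List.foldl_cons, pvAStep, pvSCut]
    split_ifs with h1 h2 h3
    · rw [ih (d+1) (cur ++ [c]) fs]
      cases hp : pvSCut r (d+1) with
      | mk seg o => cases o <;> simp
    · rw [ih (d-1) (cur ++ [c]) fs]
      cases hp : pvSCut r (d-1) with
      | mk seg o => cases o <;> simp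
    · obtain ⟨hc, hd⟩ := h3
      subst hd; simp
    · rw [ih d (cur ++ [c]) fs]
      cases hp : pvSCut r d with
      | mk seg o => cases o <;> simp

-- the main bridge: A's loop from a fresh accumulator computes fs ++ B's result
theorem pvFold_bGo : ∀ (n : Nat) (s : List Char), s.length ≤ n → ∀ (fs : List (List Char)),
    pvAFin (List.foldl pvAStep (fs, 0, ([] : List Char)) s) = fs ++ pvBGo s := by
  intro n
  induction n with
  | zero =>
    intro s hs fs
    have : s = [] := List.eq_nil_of_length_eq_zero (by omega)
    subst this
    rw [pvBGo]
    simp only [pvCut, pvCutGo, pvAFin]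
    split_ifs <;> simp_all
  | succ n ih =>
    intro s hs fs
    rw [pvFold_scut s 0 [] fs]
    rw [pvBGo]
    rw [pvCut_eq_sCut]
    cases hp : pvSCut s 0 with
    | mk seg o =>
      cases o with
      | none => simp
      | some rest =>
        have hlen : rest.length < s.length :=
          pvCut_some_length s seg rest (by rw [pvCut_eq_sCut, hp])
        simp only []
        rw [ih rest (by omega) (fs ++ [([] : List Char) ++ seg])]
        simp

-- ===== VERDICT (by name: the statement is the Claim_ definition above) =====
theorem split_struct_fields_py_spec : Claim_equal_split_struct_fields_py := by
  intro body _
  unfold Spec_split_struct_fields_py split_struct_fields_py split_struct_fields_py_alt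
  rw [pvFold_bGo body.toList.length body.toList (le_refl _) []]
  simp
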